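-- pv_equiv track=rewrite | github.com/HenriqueVarellaEhrenfried/Text_Representation | Develop/SimpleTest.py | equal_distances
-- ===== SOURCE A (Python) =====
-- def equal_distances(points, distances):
--     counter = {}
--     for i in range(0,len(distances)):
--         d = distances[i]
--         if str(d) in counter:
--             counter[str(d)].append(points[i])
--         else:
--             counter[str(d)] = [points[i]]
--     return counter
-- ===== SOURCE B (Python) =====
-- def equal_distances(points, distances):
--     keys = []
--     for d in distances:
--         s = str(d)
--         if s not in keys:
--             keys.append(s)
--     return {k: [p for p, d in zip(points, distances) if str(d) == k] for k in keys}
-- ===== Notes on version B (the rewrite author's own statement) =====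
-- stated objective: alternative
-- what changed: Replaces A's single-pass dict accumulation (append to counter[str(d)] per index) with a two-phase scheme: first deduplicate the distance strings in first-occurrence order, then build each group independently by filtering the zipped (point, distance) list.
import Mathlib
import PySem

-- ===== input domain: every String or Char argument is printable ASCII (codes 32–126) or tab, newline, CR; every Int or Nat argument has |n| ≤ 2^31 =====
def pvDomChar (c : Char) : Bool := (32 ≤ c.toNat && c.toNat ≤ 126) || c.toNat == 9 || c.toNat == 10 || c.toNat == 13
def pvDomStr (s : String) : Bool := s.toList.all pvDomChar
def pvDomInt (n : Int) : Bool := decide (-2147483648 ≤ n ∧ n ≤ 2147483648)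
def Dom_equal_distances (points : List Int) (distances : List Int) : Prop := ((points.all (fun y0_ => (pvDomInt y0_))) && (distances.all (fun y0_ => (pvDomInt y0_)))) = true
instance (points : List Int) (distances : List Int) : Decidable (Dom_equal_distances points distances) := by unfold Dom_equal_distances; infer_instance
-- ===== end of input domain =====

-- B rebuilds the same dict by deduplicating the distance strings first and then filtering the
-- zipped (point, distance) list per key — an alternative two-phase decomposition, not faster.


-- ===== PORT A =====
def equal_distances (points : List Int) (distances : List Int) : List (String × List Int) :=
  ((PySem.List.pyRange 0 (distances.length : Int) 1).foldl
    (fun (counter : PySem.Dict String (List Int)) i =>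
      let d := PySem.List.pyGetD distances i 0
      if counter.contains (PySem.Int.toStr d) then
        counter.insert (PySem.Int.toStr d)
          (counter.getD (PySem.Int.toStr d) [] ++ [PySem.List.pyGetD points i 0])
      else
        counter.insert (PySem.Int.toStr d) [PySem.List.pyGetD points i 0])
    PySem.Dict.empty).items

-- ===== PORT B =====
def equal_distances_alt (points : List Int) (distances : List Int) : List (String × List Int) :=
  let keys := distances.foldl
    (fun (ks : List String) d =>
      let s := PySem.Int.toStr d
      if s ∈ ks then ks else ks ++ [s]) []
  keys.map (fun k =>
    (k, (points.zip distances).filterMap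
          (fun pd => if PySem.Int.toStr pd.2 = k then some pd.1 else none)))

-- ===== PRECONDITION & SPEC =====
-- A raises IndexError on points[i] when distances is longer than points; exactly those inputs are excluded.
def Pre_equal_distances (points : List Int) (distances : List Int) : Prop :=
  distances.length ≤ points.length
instance (points : List Int) (distances : List Int) : Decidable (Pre_equal_distances points distances) := by unfold Pre_equal_distances; infer_instance
def pvWitness_equal_distances : List Int × List Int := ([4, 7, 9], [1, 1, 2])

def Spec_equal_distances (points : List Int) (distances : List Int) (out : List (String × List Int)) : Prop := out = equal_distances_alt points distances
instance (points : List Int) (distances : List Int) (out : List (String × List Int)) : Decidable (Spec_equal_distances points distances out) := by unfold Spec_equal_distances; infer_instance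

-- ===== CLAIM (what is proved, stated in full; the proofs are below) =====
def Claim_equal_equal_distances : Prop := ∀ (points : List Int) (distances : List Int), Dom_equal_distances points distances → Pre_equal_distances points distances → Spec_equal_distances points distances (equal_distances points distances)

-- ===== LEMMAS AND PROOFS =====

lemma foldl_range_getD_two {σ : Type} (f : σ → Int → Int → σ) :
    ∀ (ys xs : List Int) (c : σ), ys.length ≤ xs.length →
      (List.range ys.length).foldl (fun acc k => f acc (xs.getD k 0) (ys.getD k 0)) c
        = (xs.zip ys).foldl (fun acc pd => f acc pd.1 pd.2) c := by
  intro ys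
  induction ys with
  | nil => intro xs c _; simp
  | cons y yt ih =>
    intro xs c h
    cases xs with
    | nil => simp at h
    | cons x xt =>
      simp only [List.length_cons, List.range_succ_eq_map, List.foldl_cons, List.foldl_map,
        List.getD_cons_zero, List.getD_cons_succ, List.zip_cons_cons]
      exact ih xt (f c x y) (by simpa using h)

lemma filterMap_ite {α β : Type} (p : α → Prop) [DecidablePred p] (f : α → β) (l : List α) :
    l.filterMap (fun x => if p x then some (f x) else none)
      = (l.filter (fun x => decide (p x))).map f := by
  induction l with
  | nil => rfl
  | cons a t ih => by_cases h : p a <;> simp [h, ih]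


theorem equal_distances_eq (points distances : List Int)
    (h : distances.length ≤ points.length) :
    equal_distances points distances = equal_distances_alt points distances := by
  unfold equal_distances equal_distances_alt
  -- Step 1: range fold → Nat-range fold → zip fold
  rw [PySem.List.pyRange_one]
  simp only [sub_zero, Int.toNat_natCast, List.foldl_map, zero_add, PySem.List.pyGetD_natCast]
  rw [foldl_range_getD_two
    (fun (counter : PySem.Dict String (List Int)) p d =>
      if counter.contains (PySem.Int.toStr d) then
        counter.insert (PySem.Int.toStr d) (counter.getD (PySem.Int.toStr d) [] ++ [p])
      else
        counter.insert (PySem.Int.toStr d) [p]) distances points PySem.Dict.empty h]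
  -- Step 2: each step = modify
  have hstep : (fun (c : PySem.Dict String (List Int)) (pd : Int × Int) =>
      if c.contains (PySem.Int.toStr pd.2) then
        c.insert (PySem.Int.toStr pd.2) (c.getD (PySem.Int.toStr pd.2) [] ++ [pd.1])
      else
        c.insert (PySem.Int.toStr pd.2) [pd.1])
      = (fun (c : PySem.Dict String (List Int)) (pd : Int × Int) =>
          c.modify (PySem.Int.toStr pd.2) [] (· ++ [pd.1])) := by
    funext c pd
    by_cases hc : c.contains (PySem.Int.toStr pd.2)
    · simp only [hc, if_true]; rfl
    · simp only [hc, if_false, Bool.false_eq_true]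
      have : c.getD (PySem.Int.toStr pd.2) [] = [] := by
        apply PySem.Dict.getD_of_not_contains
        simpa using hc
      show c.insert _ [pd.1] = c.insert _ (c.getD (PySem.Int.toStr pd.2) [] ++ [pd.1])
      rw [this]; rfl
  rw [hstep]
  -- Step 3: zip fold = fold over mapped pair list keyed by fst
  rw [show (List.foldl (fun (c : PySem.Dict String (List Int)) (pd : Int × Int) =>
        c.modify (PySem.Int.toStr pd.2) [] (· ++ [pd.1])) PySem.Dict.empty (points.zip distances))
      = (List.foldl (fun (c : PySem.Dict String (List Int)) (p : String × Int) =>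
          c.modify p.1 [] (· ++ [p.2])) PySem.Dict.empty
          ((points.zip distances).map (fun pd => (PySem.Int.toStr pd.2, pd.1))))
    from (@List.foldl_map (Int × Int) (String × Int) (PySem.Dict String (List Int))
        (fun pd => (PySem.Int.toStr pd.2, pd.1))
        (fun c p => c.modify p.1 [] (· ++ [p.2])) (points.zip distances) PySem.Dict.empty).symm]
  set L := (points.zip distances).map (fun pd => (PySem.Int.toStr pd.2, pd.1)) with hL
  have hnd : (List.foldl (fun (c : PySem.Dict String (List Int)) (p : String × Int) =>
      c.modify p.1 [] (· ++ [p.2])) PySem.Dict.empty L).keys.Nodup :=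
    PySem.Dict.nodup_keys_foldl_modify_key L Prod.fst [] (fun _ p => (· ++ [p.2]))
      PySem.Dict.empty PySem.Dict.nodup_keys_empty
  rw [PySem.Dict.items_eq_map_keys _ hnd []]
  -- keys
  have hkeys : (List.foldl (fun (c : PySem.Dict String (List Int)) (p : String × Int) =>
      c.modify p.1 [] (· ++ [p.2])) PySem.Dict.empty L).keys
      = PySem.Set.ofList (distances.map PySem.Int.toStr) := by
    rw [PySem.Dict.keys_foldl_modify_key L Prod.fst [] (fun _ p => (· ++ [p.2]))]
    rw [PySem.Dict.keys_empty, PySem.Set.update_nil_left]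
    congr 1
    rw [hL, List.map_map]
    have : (Prod.fst ∘ fun pd : Int × Int => (PySem.Int.toStr pd.2, pd.1))
        = PySem.Int.toStr ∘ Prod.snd := rfl
    rw [this, ← List.map_map, List.map_snd_zip h]
  -- B keys
  have hbkeys : (List.foldl (fun ks d =>
      if PySem.Int.toStr d ∈ ks then ks else ks ++ [PySem.Int.toStr d]) [] distances)
      = PySem.Set.ofList (distances.map PySem.Int.toStr) := by
    rw [show (fun (ks : List String) d =>
        if PySem.Int.toStr d ∈ ks then ks else ks ++ [PySem.Int.toStr d])
        = (fun (ks : PySem.Set String) d => ks.add (PySem.Int.toStr d)) from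
      (funext fun ks => funext fun d => (PySem.Set.add_eq_ite ks (PySem.Int.toStr d)).symm),
      ← PySem.Set.update_map_eq_foldl_add, PySem.Set.update_nil_left]
  rw [hkeys, hbkeys]
  apply List.map_congr_left
  intro k _
  -- values
  rw [PySem.Dict.getD_foldl_modify_append L PySem.Dict.empty k, PySem.Dict.getD_empty]
  rw [hL, List.filter_map, List.map_map, filterMap_ite (fun pd : Int × Int => PySem.Int.toStr pd.2 = k) Prod.fst]
  simp only [Function.comp_def]
  have hpred : (fun x : Int × Int => PySem.Int.toStr x.2 == k)
      = (fun x : Int × Int => decide (PySem.Int.toStr x.2 = k)) := funext fun x => Bool.beq_eq_decide_eq _ _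
  rw [hpred]
  simp

-- ===== VERDICT (by name: the statement is the Claim_ definition above) =====
theorem equal_distances_spec : Claim_equal_equal_distances := by
  intro points distances _ hp
  unfold Spec_equal_distances
  exact equal_distances_eq points distances hp
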